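-- pv_equiv track=rewrite | github.com/lhl/realitycheck | scripts/analysis_validator.py | _strip_simple_markdown_wrappers
-- ===== SOURCE A (Python) =====
-- MARKDOWN_WRAPPER_MARKERS = ("**", "__", "`", "*", "_")
--
-- def _strip_simple_markdown_wrappers(text: str) -> str:
--     """Strip simple markdown wrappers around a whole cell value.
--
--     Handles common wrappers used in markdown tables such as:
--     - `TECH-2026-001`
--     - **TECH-2026-001**
--     - *TECH-2026-001*
--     """
--     cleaned = text.strip()
--     while cleaned:
--         updated = False
--         for marker in MARKDOWN_WRAPPER_MARKERS:
--             marker_len = len(marker)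
--             if (
--                 cleaned.startswith(marker)
--                 and cleaned.endswith(marker)
--                 and len(cleaned) > marker_len * 2
--             ):
--                 cleaned = cleaned[marker_len:-marker_len].strip()
--                 updated = True
--                 break
--         if not updated:
--             break
--     return cleaned
-- ===== SOURCE B (Python) =====
-- def _strip_simple_markdown_wrappers(text: str) -> str:
--     """Strip simple markdown wrappers by peeling one wrapper character from each end."""
--     cleaned = text.strip()
--     while len(cleaned) > 2 and cleaned[0] == cleaned[-1] and cleaned[0] in "*_`":
--         cleaned = cleaned[1:-1].strip()
--     return cleaned
-- ===== Notes on version B (the rewrite author's own statement) =====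
-- stated objective: simpler
-- what changed: Replaces A's marker-table while/for/break loop (five markers, variable-width slices, an updated flag) by a single while loop that peels one wrapper character from each end whenever the first and last characters are equal and are a wrapper character (asterisk, underscore or backtick), re-stripping after each peel; no marker table and no inner loop.
import Mathlib
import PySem

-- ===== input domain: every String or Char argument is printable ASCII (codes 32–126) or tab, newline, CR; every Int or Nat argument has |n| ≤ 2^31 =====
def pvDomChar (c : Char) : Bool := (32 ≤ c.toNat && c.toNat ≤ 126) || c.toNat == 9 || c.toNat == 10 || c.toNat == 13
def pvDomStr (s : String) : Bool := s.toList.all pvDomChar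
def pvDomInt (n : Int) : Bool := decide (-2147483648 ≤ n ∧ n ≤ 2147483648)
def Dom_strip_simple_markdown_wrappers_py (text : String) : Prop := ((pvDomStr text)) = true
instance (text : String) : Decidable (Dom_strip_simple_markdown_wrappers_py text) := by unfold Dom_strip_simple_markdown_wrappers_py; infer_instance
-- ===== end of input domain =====

-- B replaces A's marker-table while/for/break loop by peeling ONE wrapper character from each end
-- at a time (first char = last char, a wrapper character, length > 2): simpler, no marker table.

-- strip shortens (used by pvLoopB's termination proof, so it must precede the ports)
theorem pvStrip_len_le (s : List Char) : (PySem.Chars.strip s).length ≤ s.length := by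
  unfold PySem.Chars.strip PySem.Chars.lstrip PySem.Chars.rstrip
  simp only [List.length_reverse]
  exact le_trans (List.length_dropWhile_le _ _) (by simpa using List.length_dropWhile_le _ _)

-- ===== PORT A =====
-- A's inner 'for marker in MARKDOWN_WRAPPER_MARKERS: … break', the constant 5-tuple unrolled in order:
-- the first matching marker yields the new (already re-stripped) cleaned, else None
def pvPeelA (c : List Char) : Option (List Char) :=
  if PySem.Chars.startswith c ['*','*'] && PySem.Chars.endswith c ['*','*'] && decide (c.length > 4) then
    some (PySem.Chars.strip (PySem.List.slice c (some 2) (some (-2))))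
  else if PySem.Chars.startswith c ['_','_'] && PySem.Chars.endswith c ['_','_'] && decide (c.length > 4) then
    some (PySem.Chars.strip (PySem.List.slice c (some 2) (some (-2))))
  else if PySem.Chars.startswith c ['`'] && PySem.Chars.endswith c ['`'] && decide (c.length > 2) then
    some (PySem.Chars.strip (PySem.List.slice c (some 1) (some (-1))))
  else if PySem.Chars.startswith c ['*'] && PySem.Chars.endswith c ['*'] && decide (c.length > 2) then
    some (PySem.Chars.strip (PySem.List.slice c (some 1) (some (-1))))
  else if PySem.Chars.startswith c ['_'] && PySem.Chars.endswith c ['_'] && decide (c.length > 2) then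
    some (PySem.Chars.strip (PySem.List.slice c (some 1) (some (-1))))
  else none

-- A's 'while cleaned:' loop; the fuel only makes it total (each peel strictly shrinks cleaned,
-- so fuel = |text| + 1 is never exhausted)
def pvLoopA : Nat → List Char → List Char
  | 0, cleaned => cleaned
  | fuel + 1, cleaned =>
    if cleaned = [] then cleaned
    else
      match pvPeelA cleaned with
      | some c' => pvLoopA fuel c'
      | none => cleaned

def strip_simple_markdown_wrappers_py (text : String) : String :=
  String.ofList (pvLoopA (text.toList.length + 1) (PySem.Chars.strip text.toList))

-- ===== PORT B =====
-- B's 'while len(cleaned) > 2 and cleaned[0] == cleaned[-1] and cleaned[0] in "*_`":' loop;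
-- recursion is on the strictly decreasing length, no fuel
def pvLoopB (c : List Char) : List Char :=
  if h : 2 < c.length ∧ PySem.List.pyGetD c 0 ' ' = PySem.List.pyGetD c (-1) ' '
       ∧ PySem.Chars.isIn [PySem.List.pyGetD c 0 ' '] ['*','_','`'] = true then
    pvLoopB (PySem.Chars.strip (PySem.List.slice c (some 1) (some (-1))))
  else c
  termination_by c.length
  decreasing_by
    have h1 := pvStrip_len_le (PySem.List.slice c (some 1) (some (-1)))
    have h2 : (PySem.List.slice c (some 1) (some (-1))).length ≤ c.length - 2 := by
      rw [PySem.List.length_slice, PySem.List.clampIdx_neg_one]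
      simp [PySem.List.clampIdx]
      omega
    omega

def strip_simple_markdown_wrappers_py_alt (text : String) : String :=
  String.ofList (pvLoopB (PySem.Chars.strip text.toList))

-- ===== PRECONDITION & SPEC =====
def Spec_strip_simple_markdown_wrappers_py (text : String) (out : String) : Prop := out = strip_simple_markdown_wrappers_py_alt text
instance (text : String) (out : String) : Decidable (Spec_strip_simple_markdown_wrappers_py text out) := by unfold Spec_strip_simple_markdown_wrappers_py; infer_instance

-- ===== CLAIM (what is proved, stated in full; the proofs are below) =====
def Claim_equal_strip_simple_markdown_wrappers_py : Prop := ∀ (text : String), Dom_strip_simple_markdown_wrappers_py text → Spec_strip_simple_markdown_wrappers_py text (strip_simple_markdown_wrappers_py text)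

-- ===== LEMMAS AND PROOFS =====

-- characterisations of the primitive tests on a decomposed list
theorem pv_g0 (x y : Char) (m : List Char) : PySem.List.pyGetD (x :: m ++ [y]) 0 ' ' = x := by
  simp [PySem.List.pyGetD_zero]

theorem pv_g1 (x y : Char) (m : List Char) : PySem.List.pyGetD (x :: m ++ [y]) (-1) ' ' = y := by
  rw [show x :: m ++ [y] = (x :: m) ++ [y] from rfl,
    PySem.List.pyGetD_neg_one_append_singleton]

theorem pv_sw1 (x k : Char) (t : List Char) :
    PySem.Chars.startswith (x :: t) [k] = true ↔ x = k := by
  rw [PySem.Chars.startswith_iff]; simp [eq_comm]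

theorem pv_sw_head (x k k' : Char) (t : List Char)
    (h : PySem.Chars.startswith (x :: t) [k, k'] = true) : x = k := by
  rw [PySem.Chars.startswith_iff] at h
  rcases (List.cons_prefix_cons.mp h) with ⟨h1, -⟩
  exact h1.symm

theorem pv_sw2 (x u k : Char) (t : List Char) :
    PySem.Chars.startswith (x :: u :: t) [k, k] = true ↔ x = k ∧ u = k := by
  rw [PySem.Chars.startswith_iff]; simp [List.cons_prefix_cons, eq_comm]

theorem pv_ew1 (y k : Char) (l : List Char) :
    PySem.Chars.endswith (l ++ [y]) [k] = true ↔ y = k := by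
  rw [PySem.Chars.endswith_iff]
  constructor
  · intro hsuf
    rcases hsuf with ⟨t, ht⟩
    have h2 := congrArg List.reverse ht
    simp at h2
    exact h2.1.symm
  · rintro rfl; exact ⟨l, rfl⟩

theorem pv_ew2_last (y k : Char) (l : List Char)
    (h : PySem.Chars.endswith (l ++ [y]) [k, k] = true) : y = k := by
  rw [PySem.Chars.endswith_iff] at h
  rcases h with ⟨t, ht⟩
  have h2 := congrArg List.reverse ht
  simp at h2
  exact h2.1.symm

theorem pv_ew2 (v y k : Char) (l : List Char) :
    PySem.Chars.endswith (l ++ [v, y]) [k, k] = true ↔ v = k ∧ y = k := by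
  rw [PySem.Chars.endswith_iff]
  constructor
  · intro hsuf
    rcases hsuf with ⟨t, ht⟩
    have h2 := congrArg List.reverse ht
    simp at h2
    exact ⟨h2.2.1.symm, h2.1.symm⟩
  · rintro ⟨rfl, rfl⟩; exact ⟨l, rfl⟩

theorem pv_isIn1 (x : Char) :
    PySem.Chars.isIn [x] ['*','_','`'] = true ↔ x ∈ ['*','_','`'] := by
  rw [PySem.Chars.isIn_iff_infix]
  constructor
  · intro h; exact h.mem (by simp)
  · intro h; fin_cases h <;> decide

theorem pv_slice1 (x y : Char) (m : List Char) :
    PySem.List.slice (x :: m ++ [y]) (some 1) (some (-1)) = m := by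
  simp [PySem.List.slice]

theorem pv_slice2 (x u v y : Char) (w : List Char) :
    PySem.List.slice (x :: u :: w ++ [v, y]) (some 2) (some (-2)) = w := by
  simp [PySem.List.slice]

theorem pv_strip_sandwich (x y : Char) (m : List Char)
    (hx : PySem.Chars.isspace x = false) (hy : PySem.Chars.isspace y = false) :
    PySem.Chars.strip (x :: m ++ [y]) = x :: m ++ [y] := by
  unfold PySem.Chars.strip PySem.Chars.lstrip PySem.Chars.rstrip
  simp [hx, hy, List.reverse_append]

-- one B step, unfolded with its guard satisfied
theorem pv_loopB_step (x y : Char) (m : List Char) (hm : m ≠ []) (hxy : x = y)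
    (hx : x ∈ ['*','_','`']) :
    pvLoopB (x :: m ++ [y]) = pvLoopB (PySem.Chars.strip m) := by
  rw [pvLoopB, dif_pos, pv_slice1]
  refine ⟨?_, by rw [pv_g0, pv_g1]; exact hxy, by rw [pv_g0, pv_isIn1]; exact hx⟩
  have := List.length_pos_of_ne_nil hm
  simp
  omega

-- B does not step when the guard fails
theorem pv_loopB_stop (x y : Char) (m : List Char) (hcond : ¬ (x = y ∧ x ∈ ['*','_','`'])) :
    pvLoopB (x :: m ++ [y]) = x :: m ++ [y] := by
  rw [pvLoopB]
  refine dif_neg ?_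
  rintro ⟨-, heq, hin⟩
  rw [pv_g0, pv_g1] at heq
  rw [pv_g0, pv_isIn1] at hin
  exact hcond ⟨heq, hin⟩

-- A peels nothing when head ≠ last or head is no marker char
theorem pv_peelA_none (x y : Char) (m : List Char) (hcond : ¬ (x = y ∧ x ∈ ['*','_','`'])) :
    pvPeelA (x :: m ++ [y]) = none := by
  have key : ∀ k : Char, k ∈ ['*','_','`'] →
      PySem.Chars.startswith (x :: m ++ [y]) [k] = true →
      PySem.Chars.endswith (x :: m ++ [y]) [k] = true → False := by
    intro k hkmem hs he
    exact hcond ⟨((pv_sw1 _ _ _).mp hs).trans ((pv_ew1 _ _ _).mp he).symm,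
      ((pv_sw1 _ _ _).mp hs) ▸ hkmem⟩
  unfold pvPeelA
  split_ifs with h1 h2 h3 h4 h5
  · exfalso
    simp only [Bool.and_eq_true] at h1
    have hxk := pv_sw_head _ _ _ _ h1.1.1
    have hyk := pv_ew2_last _ _ _ h1.1.2
    exact hcond ⟨hxk.trans hyk.symm, by rw [hxk]; decide⟩
  · exfalso
    simp only [Bool.and_eq_true] at h2
    have hxk := pv_sw_head _ _ _ _ h2.1.1
    have hyk := pv_ew2_last _ _ _ h2.1.2
    exact hcond ⟨hxk.trans hyk.symm, by rw [hxk]; decide⟩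
  · exfalso
    simp only [Bool.and_eq_true] at h3
    exact key '`' (by decide) h3.1.1 h3.1.2
  · exfalso
    simp only [Bool.and_eq_true] at h4
    exact key '*' (by decide) h4.1.1 h4.1.2
  · exfalso
    simp only [Bool.and_eq_true] at h5
    exact key '_' (by decide) h5.1.1 h5.1.2
  · rfl

-- A's single-character peel, when neither doubled marker matches
theorem pv_peelA_single (x : Char) (m : List Char) (hm : m ≠ []) (hx : x ∈ ['*','_','`'])
    (hnd1 : ¬ (PySem.Chars.startswith (x :: m ++ [x]) ['*','*'] = true ∧
        PySem.Chars.endswith (x :: m ++ [x]) ['*','*'] = true ∧ 4 < (x :: m ++ [x]).length))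
    (hnd2 : ¬ (PySem.Chars.startswith (x :: m ++ [x]) ['_','_'] = true ∧
        PySem.Chars.endswith (x :: m ++ [x]) ['_','_'] = true ∧ 4 < (x :: m ++ [x]).length)) :
    pvPeelA (x :: m ++ [x]) = some (PySem.Chars.strip m) := by
  have hm0 : 0 < m.length := List.length_pos_of_ne_nil hm
  unfold pvPeelA
  split_ifs with h1 h2 h3 h4 h5
  · exfalso
    apply hnd1
    simp only [Bool.and_eq_true, decide_eq_true_eq] at h1
    exact ⟨h1.1.1, h1.1.2, h1.2⟩
  · exfalso
    apply hnd2
    simp only [Bool.and_eq_true, decide_eq_true_eq] at h2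
    exact ⟨h2.1.1, h2.1.2, h2.2⟩
  · rw [pv_slice1]
  · rw [pv_slice1]
  · rw [pv_slice1]
  · exfalso
    fin_cases hx
    · apply h4
      simp only [Bool.and_eq_true, decide_eq_true_eq]
      refine ⟨⟨(pv_sw1 _ _ _).mpr rfl, (pv_ew1 _ _ _).mpr rfl⟩, ?_⟩
      simp
      omega
    · apply h5
      simp only [Bool.and_eq_true, decide_eq_true_eq]
      refine ⟨⟨(pv_sw1 _ _ _).mpr rfl, (pv_ew1 _ _ _).mpr rfl⟩, ?_⟩
      simp
      omega
    · apply h3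
      simp only [Bool.and_eq_true, decide_eq_true_eq]
      refine ⟨⟨(pv_sw1 _ _ _).mpr rfl, (pv_ew1 _ _ _).mpr rfl⟩, ?_⟩
      simp
      omega

-- A's doubled-marker peel
theorem pv_peelA_double (k : Char) (w : List Char) (hw : w ≠ []) (hk : k ∈ ['*','_']) :
    pvPeelA (k :: k :: w ++ [k, k]) = some (PySem.Chars.strip w) := by
  have hw0 : 0 < w.length := List.length_pos_of_ne_nil hw
  have hk2 : k = '*' ∨ k = '_' := by simpa using hk
  unfold pvPeelA
  rcases hk2 with rfl | rfl
  · rw [if_pos, pv_slice2]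
    simp only [Bool.and_eq_true, decide_eq_true_eq]
    refine ⟨⟨(pv_sw2 _ _ _ _).mpr ⟨rfl, rfl⟩,
      (pv_ew2 '*' '*' '*' ('*' :: '*' :: w)).mpr ⟨rfl, rfl⟩⟩, ?_⟩
    simp
    omega
  · rw [if_neg, if_pos, pv_slice2]
    · simp only [Bool.and_eq_true, decide_eq_true_eq]
      refine ⟨⟨(pv_sw2 _ _ _ _).mpr ⟨rfl, rfl⟩,
        (pv_ew2 '_' '_' '_' ('_' :: '_' :: w)).mpr ⟨rfl, rfl⟩⟩, ?_⟩
      simp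
      omega
    · intro hbad
      simp only [Bool.and_eq_true] at hbad
      exact absurd (pv_sw_head _ _ _ _ hbad.1.1) (by decide)

-- doubled-marker case: one A step = two B steps
theorem pv_loop_double (fuel : Nat) (k x y : Char) (m : List Char) (hk : k ∈ ['*','_'])
    (h1 : PySem.Chars.startswith (x :: m ++ [y]) [k, k] = true)
    (h2 : PySem.Chars.endswith (x :: m ++ [y]) [k, k] = true)
    (h3 : 4 < (x :: m ++ [y]).length)
    (ih : ∀ c : List Char, c.length < fuel → pvLoopA fuel c = pvLoopB c)
    (hlen : (x :: m ++ [y]).length < fuel + 1) :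
    pvLoopA (fuel + 1) (x :: m ++ [y]) = pvLoopB (x :: m ++ [y]) := by
  have hx : x = k := pv_sw_head x k k (m ++ [y]) h1
  have hy : y = k := pv_ew2_last y k (x :: m) h2
  rw [hx, hy] at h1 h2 h3 hlen ⊢
  obtain ⟨u, w, v, rfl⟩ : ∃ u w v, m = u :: w ++ [v] := by
    have hm2 : 2 < m.length := by simp at h3; omega
    cases m with
    | nil => simp at hm2
    | cons u t =>
      have ht : t ≠ [] := by intro h0; subst h0; simp at hm2
      exact ⟨u, t.dropLast, t.getLast ht, by simp [List.dropLast_append_getLast ht]⟩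
  have hsh : k :: (u :: w ++ [v]) ++ [k] = k :: u :: w ++ [v, k] := by simp
  rw [hsh] at h1 h2 ⊢
  have hu : u = k := ((pv_sw2 k u k (w ++ [v, k])).mp h1).2
  have hv : v = k := ((pv_ew2 v k k (k :: u :: w)).mp h2).1
  rw [hu, hv] at ⊢
  have hk2 : k = '*' ∨ k = '_' := by simpa using hk
  have hk' : k ∈ ['*','_','`'] := by rcases hk2 with rfl | rfl <;> decide
  have hks : PySem.Chars.isspace k = false := by rcases hk2 with rfl | rfl <;> decide
  have hw : w ≠ [] := by
    intro h0; subst h0; simp at h3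
  rw [pvLoopA, if_neg (by simp), pv_peelA_double k w hw hk]
  have hsh2 : (k :: k :: w ++ [k, k] : List Char) = k :: (k :: w ++ [k]) ++ [k] := by simp
  have hB : pvLoopB (k :: k :: w ++ [k, k]) = pvLoopB (PySem.Chars.strip w) := by
    rw [hsh2, pv_loopB_step k k (k :: w ++ [k]) (by simp) rfl hk',
      pv_strip_sandwich k k w hks hks, pv_loopB_step k k w hw rfl hk']
  rw [hB]
  refine ih _ ?_
  have := pvStrip_len_le w
  simp at hlen
  omega

theorem pvLoop_eq (fuel : Nat) (c : List Char) (h : c.length < fuel) :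
    pvLoopA fuel c = pvLoopB c := by
  induction fuel generalizing c with
  | zero => omega
  | succ fuel ih =>
    by_cases hsmall : c.length ≤ 2
    · -- too short to peel: both sides return c
      rw [pvLoopA, pvLoopB, dif_neg (by omega)]
      cases c with
      | nil => simp
      | cons a t =>
        rw [if_neg (by simp)]
        have hp : pvPeelA (a :: t) = none := by
          unfold pvPeelA
          split_ifs <;> try rfl
          all_goals
            exfalso
            rename_i hpos
            simp only [Bool.and_eq_true, decide_eq_true_eq] at hpos
            simp at hsmall hpos
            omega
        simp [hp]
    · -- decompose c = x :: m ++ [y] with m ≠ []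
      replace hsmall : 2 < c.length := by omega
      obtain ⟨x, m, y, rfl⟩ : ∃ x m y, c = x :: m ++ [y] := by
        cases c with
        | nil => simp at hsmall
        | cons a t =>
          have ht : t ≠ [] := by intro h0; subst h0; simp at hsmall
          exact ⟨a, t.dropLast, t.getLast ht, by simp [List.dropLast_append_getLast ht]⟩
      have hm : m ≠ [] := by
        intro h0; subst h0; simp at hsmall
      by_cases hdb1 : PySem.Chars.startswith (x :: m ++ [y]) ['*','*'] = true ∧
          PySem.Chars.endswith (x :: m ++ [y]) ['*','*'] = true ∧ 4 < (x :: m ++ [y]).length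
      · exact pv_loop_double fuel '*' x y m (by decide) hdb1.1 hdb1.2.1 hdb1.2.2 ih h
      by_cases hdb2 : PySem.Chars.startswith (x :: m ++ [y]) ['_','_'] = true ∧
          PySem.Chars.endswith (x :: m ++ [y]) ['_','_'] = true ∧ 4 < (x :: m ++ [y]).length
      · exact pv_loop_double fuel '_' x y m (by decide) hdb2.1 hdb2.2.1 hdb2.2.2 ih h
      by_cases hcond : x = y ∧ x ∈ ['*','_','`']
      · -- single-character peel on both sides
        obtain ⟨rfl, hx⟩ := hcond
        rw [pvLoopA, if_neg (by simp),
          pv_peelA_single x m hm hx (by exact hdb1) (by exact hdb2)]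
        have hlm : (PySem.Chars.strip m).length < fuel := by
          have h1 := pvStrip_len_le m
          simp at h
          omega
        rw [pv_loopB_step x x m hm rfl hx]
        exact ih _ hlm
      · -- no peel on either side
        rw [pvLoopA, if_neg (by simp), pv_peelA_none x y m hcond,
          pv_loopB_stop x y m hcond]

-- ===== VERDICT (by name: the statement is the Claim_ definition above) =====
theorem strip_simple_markdown_wrappers_py_spec : Claim_equal_strip_simple_markdown_wrappers_py := by
  intro text _
  unfold Spec_strip_simple_markdown_wrappers_py strip_simple_markdown_wrappers_py
    strip_simple_markdown_wrappers_py_alt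
  rw [pvLoop_eq (text.toList.length + 1) _ (by have := pvStrip_len_le text.toList; omega)]
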